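-- pv_equiv track=rewrite | github.com/andeashkkk/Portfolio | Розділ 3/3.py | get_unigram_features
-- ===== SOURCE A (Python) =====
-- def get_unigram_features(data, vocab):
--     fet_vec_all = []
--     for tup in data:
--         single_feat_vec = []
--         words = tup[0]
--         for v in vocab:
--             if v in words:
--                 single_feat_vec.append(1)
--             else:
--                 single_feat_vec.append(0)
--         fet_vec_all.append(single_feat_vec)
--     return fet_vec_all
-- ===== SOURCE B (Python) =====
-- def get_unigram_features(data, vocab):
--     # Build once: word -> all positions where it occurs in vocab (handles duplicates).
--     index = {}
--     for i, v in enumerate(vocab):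
--         index.setdefault(v, []).append(i)
--     n = len(vocab)
--     fet_vec_all = []
--     for tup in data:
--         vec = [0] * n
--         for w in tup[0]:
--             for i in index.get(w, []):
--                 vec[i] = 1
--         fet_vec_all.append(vec)
--     return fet_vec_all
-- ===== Notes on version B (the rewrite author's own statement) =====
-- stated objective: faster
-- what changed: Instead of scanning the whole vocabulary per row with a membership test per vocab word, B builds one word->positions index over vocab and, per row, marks 1s at the indexed positions of each token in a pre-zeroed vector.
import Mathlib
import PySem

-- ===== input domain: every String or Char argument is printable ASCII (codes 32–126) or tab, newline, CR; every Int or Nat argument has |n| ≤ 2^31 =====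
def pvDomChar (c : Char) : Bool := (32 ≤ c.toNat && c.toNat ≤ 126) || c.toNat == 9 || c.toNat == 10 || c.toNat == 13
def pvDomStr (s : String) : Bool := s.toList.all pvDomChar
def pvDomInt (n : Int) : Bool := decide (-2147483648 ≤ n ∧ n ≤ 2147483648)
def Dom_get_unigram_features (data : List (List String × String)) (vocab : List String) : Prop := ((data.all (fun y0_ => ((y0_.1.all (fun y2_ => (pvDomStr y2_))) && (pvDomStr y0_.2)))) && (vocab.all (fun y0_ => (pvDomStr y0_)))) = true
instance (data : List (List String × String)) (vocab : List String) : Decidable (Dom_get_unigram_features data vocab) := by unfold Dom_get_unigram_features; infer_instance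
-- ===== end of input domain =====

-- B replaces A's per-row scan of the whole vocabulary by a word->positions index
-- built once over vocab, marking 1s in a pre-zeroed vector (objective: faster).

-- ===== PORT A =====
def get_unigram_features (data : List (List String × String)) (vocab : List String) : List (List Int) :=
  data.foldl (fun fet_vec_all tup =>
    let words := tup.1
    let single_feat_vec := vocab.foldl (fun acc v =>
      if v ∈ words then acc ++ [(1 : Int)] else acc ++ [(0 : Int)]) []
    fet_vec_all ++ [single_feat_vec]) []

-- ===== PORT B =====
-- index = {}; for i, v in enumerate(vocab): index.setdefault(v, []).append(i)
-- (setdefault(v, []).append(i) mutates the stored list: that is d.modify v [] (· ++ [i]))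
def pvBuildIndex (vocab : List String) : PySem.Dict String (List Int) :=
  (PySem.List.enumerate vocab 0).foldl
    (fun d p => d.modify p.2 [] (fun l => l ++ [p.1])) PySem.Dict.empty

-- vec = [0]*n; for w in words: for i in index.get(w, []): vec[i] = 1
-- (every stored index i comes from enumerate, so 0 ≤ i < n: `vec[i] = 1` is List.set i.toNat)
def pvMarkRow (index : PySem.Dict String (List Int)) (n : Nat) (words : List String) : List Int :=
  words.foldl (fun vec w =>
    (index.getD w []).foldl (fun vec i => vec.set i.toNat 1) vec) (List.replicate n 0)

def get_unigram_features_alt (data : List (List String × String)) (vocab : List String) : List (List Int) :=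
  let index := pvBuildIndex vocab
  let n := vocab.length
  data.foldl (fun fet_vec_all tup => fet_vec_all ++ [pvMarkRow index n tup.1]) []

-- ===== PRECONDITION & SPEC =====
def Spec_get_unigram_features (data : List (List String × String)) (vocab : List String) (out : List (List Int)) : Prop := out = get_unigram_features_alt data vocab
instance (data : List (List String × String)) (vocab : List String) (out : List (List Int)) : Decidable (Spec_get_unigram_features data vocab out) := by unfold Spec_get_unigram_features; infer_instance

-- ===== CLAIM (what is proved, stated in full; the proofs are below) =====
def Claim_equal_get_unigram_features : Prop := ∀ (data : List (List String × String)) (vocab : List String), Dom_get_unigram_features data vocab → Spec_get_unigram_features data vocab (get_unigram_features data vocab)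

-- ===== LEMMAS AND PROOFS =====

-- the index fold, characterized (keys are the second components, values the first)
theorem pv_getD_indexFold (l : List (Int × String)) (d : PySem.Dict String (List Int)) (c : String) :
    (l.foldl (fun d p => d.modify p.2 [] (fun l => l ++ [p.1])) d).getD c []
      = d.getD c [] ++ (l.filter (fun p => p.2 == c)).map (·.1) := by
  induction l generalizing d with
  | nil => simp
  | cons p l ih =>
    simp only [List.foldl_cons, ih, List.filter_cons]
    rw [PySem.Dict.getD_modify]
    by_cases h : p.2 = c
    · simp [h, List.append_assoc]
    · simp [h, (Ne.symm h : c ≠ p.2)]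

theorem pv_mem_pos (vocab : List String) (w : String) (i : Int) :
    i ∈ (pvBuildIndex vocab).getD w []
      ↔ ∃ k : Nat, ∃ _ : k < vocab.length, i = (k : Int) ∧ vocab[k] = w := by
  unfold pvBuildIndex
  rw [pv_getD_indexFold]
  simp only [PySem.Dict.getD_empty, List.nil_append, List.mem_map, List.mem_filter]
  constructor
  · rintro ⟨p, ⟨hp, hw⟩, rfl⟩
    rw [PySem.List.mem_enumerate_iff] at hp
    obtain ⟨k, hk, rfl⟩ := hp
    exact ⟨k, hk, by simp, beq_iff_eq.mp hw⟩
  · rintro ⟨k, hk, rfl, hv⟩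
    refine ⟨((k : Int), vocab[k]), ⟨?_, by simp [hv]⟩, rfl⟩
    rw [PySem.List.mem_enumerate_iff]
    exact ⟨k, hk, by simp⟩

-- the inner set-fold, elementwise
theorem pv_setFold_getElem? (P : List Int) (vec : List Int) (j : Nat) :
    (P.foldl (fun v i => v.set i.toNat 1) vec)[j]?
      = if (∃ i ∈ P, i.toNat = j) ∧ j < vec.length then some 1 else vec[j]? := by
  induction P generalizing vec with
  | nil => simp
  | cons i P ih =>
    simp only [List.foldl_cons, ih, List.length_set]
    by_cases hij : i.toNat = j
    · by_cases hlt : j < vec.length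
      · simp [hij, hlt]
      · simp [hij, hlt]
    · rw [List.getElem?_set]
      by_cases hP : (∃ i' ∈ P, i'.toNat = j) ∧ j < vec.length
      · simp [hP, hij]
      · have : ¬ ((∃ i' ∈ i :: P, i'.toNat = j) ∧ j < vec.length) := by
          rintro ⟨⟨i', hi', hji⟩, hlt⟩
          rcases List.mem_cons.mp hi' with rfl | hm
          · exact hij hji
          · exact hP ⟨⟨i', hm, hji⟩, hlt⟩
        simp [hP, hij]

theorem pv_setFold_length (P : List Int) (vec : List Int) :
    (P.foldl (fun v i => v.set i.toNat 1) vec).length = vec.length := by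
  induction P generalizing vec with
  | nil => rfl
  | cons i P ih => simp [ih]

theorem pv_markFold_getElem? (index : PySem.Dict String (List Int)) (ws : List String)
    (vec : List Int) (j : Nat) :
    (ws.foldl (fun vec w => (index.getD w []).foldl (fun vec i => vec.set i.toNat 1) vec) vec)[j]?
      = if (∃ w ∈ ws, ∃ i ∈ index.getD w [], i.toNat = j) ∧ j < vec.length then some 1
        else vec[j]? := by
  induction ws generalizing vec with
  | nil => simp
  | cons w ws ih =>
    simp only [List.foldl_cons, ih, pv_setFold_length, pv_setFold_getElem?]
    by_cases hlt : j < vec.length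
    · by_cases hA : ∃ i ∈ index.getD w [], i.toNat = j
      · simp [hA, hlt]
      · by_cases hB : ∃ w' ∈ ws, ∃ i ∈ index.getD w' [], i.toNat = j
        · simp [hA, hB, hlt]
        · simp [hA, hB, hlt]
    · simp [hlt]

theorem pv_row_eq (vocab : List String) (ws : List String) :
    pvMarkRow (pvBuildIndex vocab) vocab.length ws
      = vocab.map (fun v => if v ∈ ws then (1 : Int) else 0) := by
  apply List.ext_getElem?
  intro j
  unfold pvMarkRow
  rw [pv_markFold_getElem?, List.length_replicate]
  by_cases hj : j < vocab.length
  · have hmem : (∃ w ∈ ws, ∃ i ∈ (pvBuildIndex vocab).getD w [], i.toNat = j) ↔ vocab[j] ∈ ws := by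
      constructor
      · rintro ⟨w, hw, i, hi, hij⟩
        rw [pv_mem_pos] at hi
        obtain ⟨k, hk, rfl, hv⟩ := hi
        simp only [Int.toNat_natCast] at hij
        subst hij; exact hv ▸ hw
      · intro hv
        refine ⟨vocab[j], hv, (j : Int), ?_, by simp⟩
        rw [pv_mem_pos]
        exact ⟨j, hj, rfl, rfl⟩
    rw [List.getElem?_map, List.getElem?_eq_getElem hj]
    by_cases hin : vocab[j] ∈ ws
    · simp [hmem.mpr hin, hj, hin]
    · have hne : ¬ ∃ w ∈ ws, ∃ i ∈ (pvBuildIndex vocab).getD w [], i.toNat = j :=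
        fun hx => hin (hmem.mp hx)
      have hne2 : ∀ w ∈ ws, ∀ i ∈ (pvBuildIndex vocab).getD w [], ¬ i.toNat = j :=
        fun w hw i hi hij => hne ⟨w, hw, i, hi, hij⟩
      simp [hj, hin]
      exact hne2
  · have : ¬ ((∃ w ∈ ws, ∃ i ∈ (pvBuildIndex vocab).getD w [], i.toNat = j) ∧ j < vocab.length) :=
      fun h => hj h.2
    simp only [this, if_false]
    rw [List.getElem?_eq_none (by simpa using hj), List.getElem?_eq_none (by simpa using hj)]

-- A's inner loop is the indicator map
theorem pv_rowA_eq (vocab words : List String) :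
    vocab.foldl (fun acc v => if v ∈ words then acc ++ [(1 : Int)] else acc ++ [(0 : Int)]) []
      = vocab.map (fun v => if v ∈ words then (1 : Int) else 0) := by
  have : ∀ (l : List String) (acc : List Int),
      l.foldl (fun acc v => if v ∈ words then acc ++ [(1 : Int)] else acc ++ [(0 : Int)]) acc
        = acc ++ l.map (fun v => if v ∈ words then (1 : Int) else 0) := by
    intro l
    induction l with
    | nil => simp
    | cons v l ih =>
      intro acc
      by_cases h : v ∈ words <;> simp [h, ih, List.append_assoc]
  simpa using this vocab []

-- ===== VERDICT (by name: the statement is the Claim_ definition above) =====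
theorem get_unigram_features_spec : Claim_equal_get_unigram_features := by
  intro data vocab _
  unfold Spec_get_unigram_features get_unigram_features get_unigram_features_alt
  simp only
  rw [PySem.List.foldl_append_singleton_eq_map, PySem.List.foldl_append_singleton_eq_map]
  simp only [List.nil_append]
  apply List.map_congr_left
  intro tup _
  rw [pv_rowA_eq, pv_row_eq]
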